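-- pv_equiv track=rewrite | github.com/weiligao/adventofcode | 2025/06/aoc_template.py | part1
-- ===== SOURCE A (Python) =====
-- def transpose(matrix):
--     return [[row[i] for row in matrix] for i in range(len(matrix[0]))]
--
-- def multiply(numbers):
--     prod = 1
--
--     for number in numbers:
--         prod *= number
--
--     return prod
--
-- def part1(data):
--     """Solve part 1."""
--     problems = transpose([[x for x in row.split()] for row in data])
--     problems = [(problem[:-1], problem[-1]) for problem in problems]
--
--     res = 0
--
--     for numbers, operation in problems:
--         numbers = [int(number) for number in numbers]
--         res += sum(numbers) if operation == "+" else multiply(numbers)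
--
--     return res
-- ===== SOURCE B (Python) =====
-- def part1(data):
--     """Solve part 1."""
--     ops = data[-1].split()
--     n = len(data[0].split())
--     sums = [0] * n
--     prods = [1] * n
--     for row in data[:-1]:
--         toks = row.split()
--         sums = [s + int(t) for s, t in zip(sums, toks)]
--         prods = [p * int(t) for p, t in zip(prods, toks)]
--     return sum(sums[i] if ops[i] == "+" else prods[i] for i in range(n))
-- ===== Notes on version B (the rewrite author's own statement) =====
-- stated objective: alternative
-- what changed: B drops the transpose step entirely: one row-major pass over data[:-1] maintains running per-column sums and products via zip, with the last row's tokens read directly as the per-column operators, instead of A's building the transposed matrix and folding each column.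
import Mathlib
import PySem

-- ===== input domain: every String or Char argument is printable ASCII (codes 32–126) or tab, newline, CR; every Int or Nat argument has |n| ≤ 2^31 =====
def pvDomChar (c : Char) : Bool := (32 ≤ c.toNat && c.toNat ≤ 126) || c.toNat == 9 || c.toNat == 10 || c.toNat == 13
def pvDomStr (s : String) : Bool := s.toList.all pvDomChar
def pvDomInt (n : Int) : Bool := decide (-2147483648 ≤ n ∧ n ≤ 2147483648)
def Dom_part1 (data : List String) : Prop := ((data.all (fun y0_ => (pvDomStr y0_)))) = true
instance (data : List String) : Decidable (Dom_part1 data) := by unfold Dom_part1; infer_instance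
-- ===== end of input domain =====

-- B replaces A's transpose-then-per-column-fold with a single row-major pass that keeps running
-- per-column sums and products (objective: alternative — no transpose step, a different traversal).

-- ===== PORT A =====
-- transpose(matrix); matrix[0] raises IndexError on [] (excluded by Pre_), headD [] stands in there
def pyTranspose (matrix : List (List String)) : List (List String) :=
  (List.range (matrix.headD []).length).map
    (fun i => matrix.map (fun row => (PySem.List.pyGet? row (Int.ofNat i)).getD ""))

-- multiply(numbers)
def pyMultiply (numbers : List Int) : Int :=
  numbers.foldl (fun prod number => prod * number) 1

def part1 (data : List String) : Int :=
  let problems := pyTranspose (data.map (fun row => PySem.Str.split₀ row))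
  -- [(problem[:-1], problem[-1]) for problem in problems]; problem[-1] raises on an empty column
  -- (only possible for data = [], excluded by Pre_), getD "" stands in there
  let problems2 := problems.map
    (fun p => (PySem.List.slice p none (some (-1)), (PySem.List.pyGet? p (-1)).getD ""))
  problems2.foldl
    (fun res np =>
      -- int(number) raises ValueError on a non-int token (excluded by Pre_), getD 0 stands in there
      let numbers := np.1.map (fun s => (PySem.Int.ofStr? s).getD 0)
      res + (if np.2 = "+" then numbers.sum else pyMultiply numbers)) 0

-- ===== PORT B =====
def part1_alt (data : List String) : Int :=
  -- data[-1] raises on [] (excluded by Pre_), getD "" stands in there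
  let ops := PySem.Str.split₀ ((PySem.List.pyGet? data (-1)).getD "")
  let n := (PySem.Str.split₀ (data.headD "")).length
  let sp : List Int × List Int :=
    (PySem.List.slice data none (some (-1))).foldl
      (fun sp row =>
        let toks := PySem.Str.split₀ row
        ((sp.1.zip toks).map (fun st => st.1 + (PySem.Int.ofStr? st.2).getD 0),
         (sp.2.zip toks).map (fun pt => pt.1 * (PySem.Int.ofStr? pt.2).getD 0)))
      (List.replicate n 0, List.replicate n 1)
  ((List.range n).map
    (fun i => if (PySem.List.pyGet? ops (Int.ofNat i)).getD "" = "+"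
              then sp.1.getD i 0 else sp.2.getD i 0)).sum

-- ===== PRECONDITION & SPEC =====
-- Pre_ excludes exactly the inputs where A raises: empty data (IndexError on matrix[0]), a row with
-- fewer tokens than the first row (IndexError in transpose), and a non-last-row token in the first
-- len(data[0].split()) columns that int() rejects (ValueError).
def Pre_part1 (data : List String) : Prop :=
  data ≠ [] ∧
  (∀ row ∈ data, (PySem.Str.split₀ (data.headD "")).length ≤ (PySem.Str.split₀ row).length) ∧
  (∀ row ∈ data.dropLast, ∀ t ∈ (PySem.Str.split₀ row).take (PySem.Str.split₀ (data.headD "")).length,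
    (PySem.Int.ofStr? t).isSome = true)
instance (data : List String) : Decidable (Pre_part1 data) := by unfold Pre_part1; infer_instance

def pvWitness_part1 : List String := ["1 2", "3 4", "+ *"]

def Spec_part1 (data : List String) (out : Int) : Prop := out = part1_alt data
instance (data : List String) (out : Int) : Decidable (Spec_part1 data out) := by unfold Spec_part1; infer_instance

-- ===== CLAIM (what is proved, stated in full; the proofs are below) =====
def Claim_equal_part1 : Prop := ∀ (data : List String), Dom_part1 data → Pre_part1 data → Spec_part1 data (part1 data)

-- ===== LEMMAS AND PROOFS =====

-- the integer value of token i of row r (both ports apply int() = ofStr?.getD 0 to the same token)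
def colVal (r : String) (i : Nat) : Int :=
  (PySem.Int.ofStr? ((PySem.Str.split₀ r).getD i "")).getD 0

-- B's row-major fold keeps length-n accumulators whose i-th entries are the running column-i sum
-- and product (product in row order, i.e. a left fold starting from the initial entry)
theorem fold_char (rows : List String) (n : Nat) :
    ∀ (s p : List Int), s.length = n → p.length = n →
    (∀ r ∈ rows, n ≤ (PySem.Str.split₀ r).length) →
    (rows.foldl (fun sp row =>
        ((sp.1.zip (PySem.Str.split₀ row)).map (fun st => st.1 + (PySem.Int.ofStr? st.2).getD 0),
         (sp.2.zip (PySem.Str.split₀ row)).map (fun pt => pt.1 * (PySem.Int.ofStr? pt.2).getD 0)))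
      (s, p)).1.length = n ∧
    (rows.foldl (fun sp row =>
        ((sp.1.zip (PySem.Str.split₀ row)).map (fun st => st.1 + (PySem.Int.ofStr? st.2).getD 0),
         (sp.2.zip (PySem.Str.split₀ row)).map (fun pt => pt.1 * (PySem.Int.ofStr? pt.2).getD 0)))
      (s, p)).2.length = n ∧
    ∀ i, i < n →
      (rows.foldl (fun sp row =>
          ((sp.1.zip (PySem.Str.split₀ row)).map (fun st => st.1 + (PySem.Int.ofStr? st.2).getD 0),
           (sp.2.zip (PySem.Str.split₀ row)).map (fun pt => pt.1 * (PySem.Int.ofStr? pt.2).getD 0)))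
        (s, p)).1.getD i 0 = s.getD i 0 + (rows.map (fun r => colVal r i)).sum ∧
      (rows.foldl (fun sp row =>
          ((sp.1.zip (PySem.Str.split₀ row)).map (fun st => st.1 + (PySem.Int.ofStr? st.2).getD 0),
           (sp.2.zip (PySem.Str.split₀ row)).map (fun pt => pt.1 * (PySem.Int.ofStr? pt.2).getD 0)))
        (s, p)).2.getD i 0 = (rows.map (fun r => colVal r i)).foldl (· * ·) (p.getD i 0) := by
  induction rows with
  | nil => intro s p hs hp _; simp [hs, hp]
  | cons r rows ih =>
    intro s p hs hp hr
    have hrn : n ≤ (PySem.Str.split₀ r).length := hr r (by simp)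
    have hs' : ((s.zip (PySem.Str.split₀ r)).map (fun st => st.1 + (PySem.Int.ofStr? st.2).getD 0)).length = n := by
      simp [hs]; omega
    have hp' : ((p.zip (PySem.Str.split₀ r)).map (fun pt => pt.1 * (PySem.Int.ofStr? pt.2).getD 0)).length = n := by
      simp [hp]; omega
    have key := ih _ _ hs' hp' (fun r' hr' => hr r' (by simp [hr']))
    simp only [List.foldl_cons]
    refine ⟨key.1, key.2.1, ?_⟩
    intro i hi
    have h1 := (key.2.2 i hi).1
    have h2 := (key.2.2 i hi).2
    have hgs : ((s.zip (PySem.Str.split₀ r)).map (fun st => st.1 + (PySem.Int.ofStr? st.2).getD 0)).getD i 0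
        = s.getD i 0 + colVal r i := by
      rw [List.getD_eq_getElem _ _ (by omega)]
      simp [List.getElem_zip, colVal, List.getElem?_eq_getElem (by omega : i < s.length),
        List.getElem?_eq_getElem (by omega : i < (PySem.Str.split₀ r).length)]
    have hgp : ((p.zip (PySem.Str.split₀ r)).map (fun pt => pt.1 * (PySem.Int.ofStr? pt.2).getD 0)).getD i 0
        = p.getD i 0 * colVal r i := by
      rw [List.getD_eq_getElem _ _ (by omega)]
      simp [List.getElem_zip, colVal, List.getElem?_eq_getElem (by omega : i < p.length),
        List.getElem?_eq_getElem (by omega : i < (PySem.Str.split₀ r).length)]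
    constructor
    · rw [h1, hgs]; simp; ring
    · rw [h2, hgp]; simp

-- both programs compute Σ_i (if op_i = "+" then column-i sum else row-ordered column-i product)
theorem part1_eq_alt (data : List String) (hne : data ≠ [])
    (hlen : ∀ row ∈ data, (PySem.Str.split₀ (data.headD "")).length ≤ (PySem.Str.split₀ row).length) :
    part1 data = part1_alt data := by
  set n := (PySem.Str.split₀ (data.headD "")).length with hn
  have hlast : (PySem.List.pyGet? data (-1)).getD "" = data.getLast hne := by
    rw [PySem.List.pyGet?_neg_one, List.getLast?_eq_getLast_of_ne_nil hne]; rfl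
  have hA : part1 data =
      ((List.range n).map (fun i =>
        let col := data.dropLast.map (fun r => colVal r i)
        if (PySem.Str.split₀ (data.getLast hne)).getD i "" = "+" then col.sum
        else pyMultiply col)).sum := by
    have hhead : (List.map (fun row => PySem.Str.split₀ row) data).headD [] = PySem.Str.split₀ (data.headD "") := by
      cases data with
      | nil => exact absurd rfl hne
      | cons a l => rfl
    simp only [part1, pyTranspose, List.map_map, hhead]
    rw [PySem.List.foldl_add]
    rw [zero_add]
    rw [List.map_map]
    refine congrArg List.sum (List.map_congr_left ?_)
    intro i hi
    simp only [Function.comp]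
    rw [PySem.List.slice_to_neg_one]
    have hmapdl : (List.map ((fun row => (PySem.List.pyGet? row (Int.ofNat i)).getD "") ∘ fun row => PySem.Str.split₀ row) data).dropLast
        = data.dropLast.map (fun r => (PySem.List.pyGet? (PySem.Str.split₀ r) (Int.ofNat i)).getD "") := by
      rw [← List.map_dropLast]; rfl
    have hlastq : (PySem.List.pyGet? (List.map ((fun row => (PySem.List.pyGet? row (Int.ofNat i)).getD "") ∘ fun row => PySem.Str.split₀ row) data) (-1)).getD ""
        = (PySem.List.pyGet? (PySem.Str.split₀ (data.getLast hne)) (Int.ofNat i)).getD "" := by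
      rw [PySem.List.pyGet?_neg_one, List.getLast?_map, List.getLast?_eq_getLast_of_ne_nil hne]
      rfl
    rw [hmapdl, hlastq]
    have htok : ∀ r : String, (PySem.List.pyGet? (PySem.Str.split₀ r) (Int.ofNat i)).getD "" = (PySem.Str.split₀ r).getD i "" := by
      intro r
      rw [show (Int.ofNat i) = ((i : Nat) : Int) from rfl, PySem.List.pyGet?_natCast, List.getD_eq_getElem?_getD]
    rw [htok]
    simp only [List.map_map, htok]
    rfl
  have hB : part1_alt data =
      ((List.range n).map (fun i =>
        let col := data.dropLast.map (fun r => colVal r i)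
        if (PySem.Str.split₀ (data.getLast hne)).getD i "" = "+" then col.sum
        else pyMultiply col)).sum := by
    simp only [part1_alt]
    rw [hlast, ← hn, PySem.List.slice_to_neg_one]
    have hchar := fold_char data.dropLast n (List.replicate n 0) (List.replicate n 1)
      (by simp) (by simp)
      (fun r hr' => hlen r (List.mem_of_mem_dropLast hr'))
    refine congrArg List.sum (List.map_congr_left ?_)
    intro i hi
    have hi' : i < n := List.mem_range.mp hi
    have h1 := (hchar.2.2 i hi').1
    have h2 := (hchar.2.2 i hi').2
    rw [h1, h2]
    have hops : (PySem.List.pyGet? (PySem.Str.split₀ (data.getLast hne)) (Int.ofNat i)).getD ""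
        = (PySem.Str.split₀ (data.getLast hne)).getD i "" := by
      rw [show (Int.ofNat i) = ((i : Nat) : Int) from rfl, PySem.List.pyGet?_natCast, List.getD_eq_getElem?_getD]
    rw [hops]
    simp [pyMultiply, hi']
  rw [hA, hB]

-- ===== VERDICT (by name: the statement is the Claim_ definition above) =====
theorem part1_spec : Claim_equal_part1 := by
  intro data _ hpre
  exact part1_eq_alt data hpre.1 hpre.2.1
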